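-- pv_equiv track=rewrite | github.com/shllvii/SyGuS-3days | src/synthBV.py | constructValue
-- ===== SOURCE A (Python) =====
-- def genPower(sig, length):
--     assert(sig >= 0)
--     if (sig == 0):
--         # return '#b' + '0' * (length - 1) + '1'
--         return '#x' + '0' * 15 + '1'
--     return '(shl1 ' + genPower(sig - 1, length) + ')'
--
-- def constructValue(value, pos, length):
--     if (pos == -1):
--         # return '#b' + '0' * (length - 1) + '1'
--         return '#x' + '0' * 16
--     elif (value & (1 << pos) != 0):
--         return '(bvor ' + constructValue(value, pos - 1, length) + ' ' + \
--             genPower(pos, length) + ')'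
--     else:
--         return constructValue(value, pos - 1, length)
-- ===== SOURCE B (Python) =====
-- def constructValue(value, pos, length):
--     acc = '#x' + '0' * 16
--     for p in range(pos + 1):
--         if value & (1 << p):
--             s = '#x' + '0' * 15 + '1'
--             for _ in range(p):
--                 s = '(shl1 ' + s + ')'
--             acc = '(bvor ' + acc + ' ' + s + ')'
--     return acc
-- ===== Notes on version B (the rewrite author's own statement) =====
-- stated objective: simpler
-- what changed: Replaces the two mutually nested linear recursions (constructValue descending on pos, genPower descending on sig) with a single iterative accumulator loop over p in range(pos+1), building each shl1-power with an inner loop; no recursion and no helper function.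
-- outside the precondition, e.g. on constructValue(0, 950, 64): A returns '#x0000000000000000', B returns '#x0000000000000000'
import Mathlib
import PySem

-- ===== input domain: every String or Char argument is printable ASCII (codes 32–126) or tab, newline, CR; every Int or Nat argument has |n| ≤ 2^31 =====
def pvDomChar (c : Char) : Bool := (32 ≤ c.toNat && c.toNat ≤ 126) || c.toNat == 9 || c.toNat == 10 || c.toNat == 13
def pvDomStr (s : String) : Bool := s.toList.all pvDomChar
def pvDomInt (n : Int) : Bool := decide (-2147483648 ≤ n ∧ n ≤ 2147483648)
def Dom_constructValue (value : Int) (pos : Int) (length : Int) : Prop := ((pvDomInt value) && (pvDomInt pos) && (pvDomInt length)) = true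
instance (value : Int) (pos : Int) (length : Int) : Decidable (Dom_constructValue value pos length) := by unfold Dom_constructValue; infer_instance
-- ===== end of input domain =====

-- B replaces A's two linear recursions with one iterative accumulator loop (objective: simpler).

-- ===== PORT A =====
-- Python's genPower asserts sig >= 0 and recurses sig -> sig-1; inside constructValue it is
-- only ever called with sig = pos >= 0, so it is ported as structural recursion on that Nat.
def genPower : Nat → Int → String
  | 0, _ => "#x" ++ String.ofList (List.replicate 15 '0') ++ "1"
  | Nat.succ s, length => "(shl1 " ++ genPower s length ++ ")"

def constructValue (value : Int) (pos : Int) (length : Int) : String :=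
  if pos = -1 then "#x" ++ String.ofList (List.replicate 16 '0')
  else if pos < -1 then ""   -- Python raises ValueError here (1 << pos with pos < 0); outside Pre_
  else if PySem.Int.band value (1 <<< pos.toNat) ≠ 0 then
    "(bvor " ++ constructValue value (pos - 1) length ++ " " ++ genPower pos.toNat length ++ ")"
  else constructValue value (pos - 1) length
termination_by (pos + 1).toNat
decreasing_by all_goals omega

-- ===== PORT B =====
def constructValue_alt (value : Int) (pos : Int) (length : Int) : String :=
  (PySem.List.pyRange 0 (pos + 1) 1).foldl (fun acc p =>
    if PySem.Int.band value (1 <<< p.toNat) ≠ 0 then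
      "(bvor " ++ acc ++ " " ++
        ((List.range p.toNat).foldl (fun s _ => "(shl1 " ++ s ++ ")")
          ("#x" ++ String.ofList (List.replicate 15 '0') ++ "1")) ++ ")"
    else acc)
    ("#x" ++ String.ofList (List.replicate 16 '0'))

-- ===== PRECONDITION & SPEC =====
-- Pre_ excludes pos < -1, where Python A raises ValueError (negative shift count), and pos > 900,
-- where A's linear recursion exceeds CPython's default recursion limit and raises RecursionError
-- (B is iterative and still returns there; the bound 900 leaves headroom below the ~996 observed limit).
def Pre_constructValue (value : Int) (pos : Int) (length : Int) : Prop := -1 ≤ pos ∧ pos ≤ 900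
instance (value : Int) (pos : Int) (length : Int) : Decidable (Pre_constructValue value pos length) := by unfold Pre_constructValue; infer_instance
def pvWitness_constructValue : Int × Int × Int := (5, 2, 64)

def Spec_constructValue (value : Int) (pos : Int) (length : Int) (out : String) : Prop := out = constructValue_alt value pos length
instance (value : Int) (pos : Int) (length : Int) (out : String) : Decidable (Spec_constructValue value pos length out) := by unfold Spec_constructValue; infer_instance

-- ===== CLAIM (what is proved, stated in full; the proofs are below) =====
def Claim_equal_constructValue : Prop := ∀ (value : Int) (pos : Int) (length : Int), Dom_constructValue value pos length → Pre_constructValue value pos length → Spec_constructValue value pos length (constructValue value pos length)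

-- ===== LEMMAS AND PROOFS =====

-- B's inner loop builds exactly A's genPower nesting.
lemma genPower_loop (n : Nat) (length : Int) :
    (List.range n).foldl (fun s _ => "(shl1 " ++ s ++ ")")
      ("#x" ++ String.ofList (List.replicate 15 '0') ++ "1") = genPower n length := by
  induction n with
  | zero => simp [genPower]
  | succ k ih => rw [List.range_succ, List.foldl_append, ih]; simp [genPower]

lemma construct_eq (n : Nat) (value length : Int) :
    constructValue value ((n : Int) - 1) length = constructValue_alt value ((n : Int) - 1) length := by
  induction n with
  | zero =>
    rw [constructValue]
    simp [constructValue_alt, PySem.List.pyRange]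
  | succ k ih =>
    have hk : ((k + 1 : Nat) : Int) - 1 = (k : Int) := by push_cast; ring
    rw [hk]
    have hrange : PySem.List.pyRange 0 ((k : Int) + 1) 1
        = PySem.List.pyRange 0 (k : Int) 1 ++ [(k : Int)] := by
      have := PySem.List.pyRange_one_succ_right (a := 0) (b := (k : Int)) (by omega)
      simpa using this
    rw [constructValue]
    have hne : (k : Int) ≠ -1 := by omega
    have hnlt : ¬ ((k : Int) < -1) := by omega
    simp only [hne, hnlt, if_false, Int.toNat_natCast]
    unfold constructValue_alt
    rw [hrange, List.foldl_append]
    have ih' : constructValue value ((k : Int) - 1) length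
        = (PySem.List.pyRange 0 ((k : Int) - 1 + 1) 1).foldl _ _ := ih
    simp only [List.foldl_cons, List.foldl_nil, Int.toNat_natCast]
    rw [genPower_loop k length]
    have harg : (k : Int) - 1 + 1 = (k : Int) := by ring
    rw [harg] at ih'
    split_ifs with h
    · rw [ih']
    · rw [ih']

-- ===== VERDICT (by name: the statement is the Claim_ definition above) =====
theorem constructValue_spec : Claim_equal_constructValue := by
  intro value pos length _ hpre
  unfold Spec_constructValue
  have h : pos = ((pos + 1).toNat : Int) - 1 := by
    unfold Pre_constructValue at hpre; omega
  rw [h]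
  exact construct_eq (pos + 1).toNat value length
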